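-- pv_equiv track=rewrite | github.com/smsh73/SBAI | analyze_views.py | find_clusters_1d
-- ===== SOURCE A (Python) =====
-- def find_clusters_1d(values, gap_threshold):
--     """1D 값들을 gap 기준으로 클러스터링"""
--     sorted_vals = sorted(set(values))
--     clusters = []
--     cluster = [sorted_vals[0]]
--     for i in range(1, len(sorted_vals)):
--         if sorted_vals[i] - sorted_vals[i-1] > gap_threshold:
--             clusters.append((min(cluster), max(cluster)))
--             cluster = [sorted_vals[i]]
--         else:
--             cluster.append(sorted_vals[i])
--     clusters.append((min(cluster), max(cluster)))
--     return clusters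
-- ===== SOURCE B (Python) =====
-- def find_clusters_1d(values, gap_threshold):
--     """1D 값들을 gap 기준으로 클러스터링 (staged: classify adjacent pairs, zip starts with ends)"""
--     vals = sorted(set(values))
--     gaps = [(a, b) for a, b in zip(vals, vals[1:]) if b - a > gap_threshold]
--     starts = [vals[0]] + [b for a, b in gaps]
--     ends = [a for a, b in gaps] + [vals[-1]]
--     return list(zip(starts, ends))
-- ===== Notes on version B (the rewrite author's own statement) =====
-- stated objective: alternative
-- what changed: Replaces A's single forward scan that buffers the current cluster in a list and calls min()/max() with a staged construction: one pass classifies adjacent pairs of the sorted unique values as gaps, then the cluster starts and cluster ends are read off independently and zipped together.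
import Mathlib
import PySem

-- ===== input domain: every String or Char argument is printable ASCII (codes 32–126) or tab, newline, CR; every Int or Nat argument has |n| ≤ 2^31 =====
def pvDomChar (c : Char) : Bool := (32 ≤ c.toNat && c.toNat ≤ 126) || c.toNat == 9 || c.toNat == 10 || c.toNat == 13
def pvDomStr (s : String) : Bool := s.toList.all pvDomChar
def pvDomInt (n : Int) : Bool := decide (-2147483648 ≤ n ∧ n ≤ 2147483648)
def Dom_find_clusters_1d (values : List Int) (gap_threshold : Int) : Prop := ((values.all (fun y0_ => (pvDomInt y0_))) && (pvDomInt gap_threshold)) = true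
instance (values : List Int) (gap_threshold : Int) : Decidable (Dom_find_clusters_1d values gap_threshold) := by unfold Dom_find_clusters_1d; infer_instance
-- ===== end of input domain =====

-- B replaces A's forward scan with a cluster buffer and min()/max() by a staged construction:
-- classify adjacent pairs as gaps, read off cluster starts and ends separately, zip them.

-- ===== PORT A =====
-- min(cluster) / max(cluster) on a nonempty list; the .getD 0 default is never reached because
-- A's loop keeps 'cluster' nonempty (Python min/max would raise only on an empty list).
def pvMin (xs : List Int) : Int := (PySem.List.min? xs (fun x => x)).getD 0
def pvMax (xs : List Int) : Int := (PySem.List.max? xs (fun x => x)).getD 0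

-- 'for i in range(1, len(sorted_vals))': walk the tail carrying the previous element
-- (= sorted_vals[i-1]) and the state (clusters, cluster), exactly A's loop body.
def loopA (gap : Int) : Int → List Int → List (Int × Int) × List Int → List (Int × Int) × List Int
  | _, [], st => st
  | prev, x :: xs, (clusters, cluster) =>
    if x - prev > gap then
      loopA gap x xs (clusters ++ [(pvMin cluster, pvMax cluster)], [x])
    else
      loopA gap x xs (clusters, cluster ++ [x])

def find_clusters_1d (values : List Int) (gap_threshold : Int) : List (Int × Int) :=
  let sorted_vals := PySem.List.sorted (PySem.Set.ofList values) (fun x => x) false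
  match sorted_vals with
  | [] => []  -- unreachable under Pre_: Python raises IndexError at sorted_vals[0]
  | v0 :: rest =>
    let st := loopA gap_threshold v0 rest ([], [v0])
    st.1 ++ [(pvMin st.2, pvMax st.2)]

-- ===== PORT B =====
-- staged passes, exactly Source B: gaps = adjacent pairs (a,b) with b - a > gap_threshold,
-- starts = vals[0] :: seconds of gaps, ends = firsts of gaps ++ [vals[-1]], zipped.
-- vals[0] / vals[-1] via pyGet?; the .getD 0 default is hit only on empty values
-- (excluded by Pre_, where the Python raises IndexError).
def find_clusters_1d_alt (values : List Int) (gap_threshold : Int) : List (Int × Int) :=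
  let vals := PySem.List.sorted (PySem.Set.ofList values) (fun x => x) false
  let gaps := (vals.zip vals.tail).filter (fun p => p.2 - p.1 > gap_threshold)
  let starts := (PySem.List.pyGet? vals 0).getD 0 :: gaps.map Prod.snd
  let ends := gaps.map Prod.fst ++ [(PySem.List.pyGet? vals (-1)).getD 0]
  starts.zip ends

-- ===== PRECONDITION & SPEC =====
-- Python A raises IndexError on empty 'values' (sorted_vals[0]); B's Python raises there too.
def Pre_find_clusters_1d (values : List Int) (gap_threshold : Int) : Prop := values ≠ []
instance (values : List Int) (gap_threshold : Int) : Decidable (Pre_find_clusters_1d values gap_threshold) := by unfold Pre_find_clusters_1d; infer_instance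
def pvWitness_find_clusters_1d : List Int × Int := ([1, 2, 5], 1)

def Spec_find_clusters_1d (values : List Int) (gap_threshold : Int) (out : List (Int × Int)) : Prop := out = find_clusters_1d_alt values gap_threshold
instance (values : List Int) (gap_threshold : Int) (out : List (Int × Int)) : Decidable (Spec_find_clusters_1d values gap_threshold out) := by unfold Spec_find_clusters_1d; infer_instance

-- ===== CLAIM (what is proved, stated in full; the proofs are below) =====
def Claim_equal_find_clusters_1d : Prop := ∀ (values : List Int) (gap_threshold : Int), Dom_find_clusters_1d values gap_threshold → Pre_find_clusters_1d values gap_threshold → Spec_find_clusters_1d values gap_threshold (find_clusters_1d values gap_threshold)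

-- ===== LEMMAS AND PROOFS =====

-- common recursive characterisation: clusters of 'l' when the open cluster spans lo..prev
def cspec (gap : Int) : Int → Int → List Int → List (Int × Int)
  | lo, prev, [] => [(lo, prev)]
  | lo, prev, x :: xs => if x - prev > gap then (lo, prev) :: cspec gap x x xs else cspec gap lo x xs

-- cspec depends on 'lo' only through the first component of the head pair
theorem cspec_head (gap : Int) : ∀ (l : List Int) (x : Int), ∃ h r, ∀ lo, cspec gap lo x l = (lo, h) :: r := by
  intro l
  induction l with
  | nil => intro x; exact ⟨x, [], fun lo => rfl⟩
  | cons y ys ih =>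
    intro x
    by_cases hc : y - x > gap
    · exact ⟨x, cspec gap y y ys, fun lo => by simp [cspec, hc]⟩
    · obtain ⟨h, r, hr⟩ := ih y
      exact ⟨h, r, fun lo => by simp [cspec, hc, hr lo]⟩

-- B's staged construction computes cspec
theorem B_cspec (gap : Int) : ∀ (l : List Int) (v0 la : Int), (v0 :: l).getLast? = some la →
    (((v0 :: (((v0 :: l).zip l).filter (fun p => p.2 - p.1 > gap)).map Prod.snd)).zip
      ((((v0 :: l).zip l).filter (fun p => p.2 - p.1 > gap)).map Prod.fst ++ [la]))
      = cspec gap v0 v0 l := by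
  intro l
  induction l with
  | nil => intro v0 la h; simp at h; simp [h, cspec]
  | cons x xs ih =>
    intro v0 la h
    have h' : (x :: xs).getLast? = some la := by simpa [List.getLast?_cons_cons] using h
    have hzip : (v0 :: x :: xs).zip (x :: xs) = (v0, x) :: (x :: xs).zip xs := rfl
    by_cases hc : x - v0 > gap
    · simp only [hzip, List.filter_cons, hc, decide_true, cspec]
      exact congrArg _ (ih x la h')
    · have hIH := ih x la h'
      simp only [hzip, List.filter_cons, show (decide (x - v0 > gap)) = false by simp [hc]]
      obtain ⟨hh, r, hr⟩ := cspec_head gap xs x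
      cases hFB : (((x :: xs).zip xs).filter (fun p => p.2 - p.1 > gap)).map Prod.fst ++ [la] with
      | nil => simp at hFB
      | cons b bs =>
        rw [hFB] at hIH
        simp only [List.zip_cons_cons] at hIH
        rw [hr x] at hIH
        have h1 := (List.cons.injEq _ _ _ _).mp hIH
        have hb : b = hh := congrArg Prod.snd h1.1
        have hbs := h1.2
        simp only [Bool.false_eq_true, if_false, hFB, List.zip_cons_cons, hbs, cspec, if_neg hc, hr v0, hb]

theorem foldl_min_of_le : ∀ (cl : List Int) (c0 : Int), (∀ y ∈ cl, c0 ≤ y) → cl.foldl min c0 = c0 := by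
  intro cl
  induction cl with
  | nil => intro c0 _; rfl
  | cons y ys ih =>
    intro c0 hle
    have : min c0 y = c0 := min_eq_left (hle y (by simp))
    simp only [List.foldl_cons, this]
    exact ih c0 (fun z hz => hle z (by simp [hz]))

theorem foldl_max_getLast : ∀ (cl : List Int) (c0 la : Int), List.Pairwise (· ≤ ·) (c0 :: cl) →
    (c0 :: cl).getLast? = some la → cl.foldl max c0 = la := by
  intro cl
  induction cl with
  | nil => intro c0 la _ h; simp at h; simp [h]
  | cons y ys ih =>
    intro c0 la hp h
    have h1 : max c0 y = y := max_eq_right (List.rel_of_pairwise_cons hp (by simp))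
    simp only [List.foldl_cons, h1]
    exact ih y la hp.of_cons (by simpa [List.getLast?_cons_cons] using h)

theorem pvMin_sorted (c0 : Int) (cl : List Int) (hp : List.Pairwise (· ≤ ·) (c0 :: cl)) :
    pvMin (c0 :: cl) = c0 := by
  simp [pvMin, PySem.List.min?_id_cons,
    foldl_min_of_le cl c0 (fun y hy => List.rel_of_pairwise_cons hp hy)]

theorem pvMax_sorted (c0 la : Int) (cl : List Int) (hp : List.Pairwise (· ≤ ·) (c0 :: cl))
    (h : (c0 :: cl).getLast? = some la) : pvMax (c0 :: cl) = la := by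
  simp [pvMax, PySem.List.max?_id_cons, foldl_max_getLast cl c0 la hp h]

theorem loopA_spec (gap : Int) : ∀ (l cl : List Int) (c0 prev : Int) (cs : List (Int × Int)),
    List.Pairwise (· ≤ ·) ((c0 :: cl) ++ l) → (c0 :: cl).getLast? = some prev →
    (let st := loopA gap prev l (cs, c0 :: cl); st.1 ++ [(pvMin st.2, pvMax st.2)])
      = cs ++ cspec gap c0 prev l := by
  intro l
  induction l with
  | nil =>
    intro cl c0 prev cs hp hla
    simp only [loopA, cspec]
    rw [pvMin_sorted c0 cl (by simpa using hp), pvMax_sorted c0 prev cl (by simpa using hp) hla]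
  | cons x xs ih =>
    intro cl c0 prev cs hp hla
    have hsort : List.Pairwise (· ≤ ·) (c0 :: cl) := hp.sublist (List.sublist_append_left _ _)
    by_cases hc : x - prev > gap
    · simp only [loopA, hc, if_pos, pvMin_sorted c0 cl hsort, pvMax_sorted c0 prev cl hsort hla]
      have hp' : List.Pairwise (· ≤ ·) (([x] : List Int) ++ xs) :=
        hp.sublist (List.sublist_append_right (c0 :: cl) (x :: xs))
      have h2 := ih [] x x (cs ++ [(c0, prev)]) (by simpa using hp') (by simp)
      simp only [cspec, hc, if_pos]
      simpa using h2
    · simp only [loopA, hc, if_neg, not_false_iff]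
      have hcons : (c0 :: cl) ++ [x] = c0 :: (cl ++ [x]) := by simp
      have hp2 : List.Pairwise (· ≤ ·) ((c0 :: (cl ++ [x])) ++ xs) := by
        have : (c0 :: (cl ++ [x])) ++ xs = (c0 :: cl) ++ (x :: xs) := by simp
        rw [this]; exact hp
      have hla2 : (c0 :: (cl ++ [x])).getLast? = some x := by
        rw [← List.cons_append]; exact List.getLast?_concat
      have := ih (cl ++ [x]) c0 x cs hp2 hla2
      rw [← hcons] at this
      simp only [this]
      simp [cspec, hc]

-- ===== VERDICT (by name: the statement is the Claim_ definition above) =====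
theorem find_clusters_1d_spec : Claim_equal_find_clusters_1d := by
  intro values gap _dom _pre
  unfold Spec_find_clusters_1d find_clusters_1d find_clusters_1d_alt
  cases hv : PySem.List.sorted (PySem.Set.ofList values) (fun x => x) false with
  | nil =>
    exfalso
    obtain ⟨x, hx⟩ := List.exists_mem_of_ne_nil values _pre
    have hmem : x ∈ PySem.List.sorted (PySem.Set.ofList values) (fun x => x) false := by
      rw [PySem.List.mem_sorted]; exact (PySem.Set.mem_ofList values x).mpr hx
    rw [hv] at hmem; simp at hmem
  | cons v0 rest =>
    have hlt : List.Pairwise (· < ·) (v0 :: rest) := by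
      rw [← hv]; exact PySem.List.sorted_ofList_pairwise_lt values
    have hle : List.Pairwise (· ≤ ·) (v0 :: rest) := hlt.imp le_of_lt
    obtain ⟨la, hla⟩ : ∃ la, (v0 :: rest).getLast? = some la :=
      ⟨(v0 :: rest).getLast (by simp), List.getLast?_eq_some_getLast (by simp)⟩
    have hA := loopA_spec gap rest [] v0 v0 [] (by simpa using hle) (by simp)
    have hB := B_cspec gap rest v0 la hla
    simp only [List.nil_append] at hA
    simp only [hA, PySem.List.pyGet?_zero_cons, PySem.List.pyGet?_neg_one, hla,
      Option.getD_some, List.tail_cons]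
    exact (hB.symm ▸ rfl)
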